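-- pv_equiv track=rewrite | github.com/TQTuyen/Project-Socket | src/smtp1.py | Get_RcptArr
-- ===== SOURCE A (Python) =====
-- def Get_RcptArr(Destinationemail,cc_Destination,bcc_Destination):
--     rcpt_arr=[]
--     to=Destinationemail.split(',')
--     cc=cc_Destination.split(',')
--     bcc=bcc_Destination.split(',')
--     for i in range(len(to)):
--         rcpt_arr.append(to[i])
--     for i in range(len(cc)):
--         rcpt_arr.append(cc[i])
--     for i in range(len(bcc)):
--         rcpt_arr.append(bcc[i])
--     for i in range(len(rcpt_arr)):
--         rcpt_arr[i]=rcpt_arr[i].strip()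
--     return rcpt_arr
-- ===== SOURCE B (Python) =====
-- def Get_RcptArr(Destinationemail, cc_Destination, bcc_Destination):
--     # Single character-level scan: walk each string char by char, accumulate the
--     # current token, flush a stripped token at every comma and at end of string.
--     rcpt = []
--     for s in (Destinationemail, cc_Destination, bcc_Destination):
--         cur = []
--         for ch in s:
--             if ch == ',':
--                 rcpt.append(''.join(cur).strip())
--                 cur = []
--             else:
--                 cur.append(ch)
--         rcpt.append(''.join(cur).strip())
--     return rcpt
-- ===== Notes on version B (the rewrite author's own statement) =====
-- stated objective: alternative
-- what changed: A splits each of the three strings with str.split, appends the pieces index by index in three loops and strips them in a fourth in-place pass; B never calls split: it runs one character-level state machine per string, accumulating the current token and flushing it (stripped) at each comma and at end of string.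
import Mathlib
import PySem

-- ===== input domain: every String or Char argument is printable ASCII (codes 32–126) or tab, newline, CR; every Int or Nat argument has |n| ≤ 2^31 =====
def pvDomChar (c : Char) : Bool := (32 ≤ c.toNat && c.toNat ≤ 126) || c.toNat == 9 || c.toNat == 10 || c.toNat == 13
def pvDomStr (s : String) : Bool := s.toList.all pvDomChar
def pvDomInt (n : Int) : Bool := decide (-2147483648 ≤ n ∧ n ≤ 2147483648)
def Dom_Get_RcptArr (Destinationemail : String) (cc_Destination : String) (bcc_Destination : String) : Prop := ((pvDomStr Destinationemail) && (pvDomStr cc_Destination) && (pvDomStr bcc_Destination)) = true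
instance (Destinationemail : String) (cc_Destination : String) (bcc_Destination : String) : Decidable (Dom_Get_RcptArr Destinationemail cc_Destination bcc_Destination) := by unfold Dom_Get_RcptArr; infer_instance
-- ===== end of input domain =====

-- B replaces A's three str.split calls, three index-append loops and in-place strip pass by one
-- character-level state machine per string that flushes a stripped token at each comma (objective: alternative).

-- ===== PORT A =====
def Get_RcptArr (Destinationemail : String) (cc_Destination : String) (bcc_Destination : String) : List String :=
  let rcpt_arr : List String := []
  let to_ := (PySem.Str.split? Destinationemail ",").getD []
  let cc := (PySem.Str.split? cc_Destination ",").getD []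
  let bcc := (PySem.Str.split? bcc_Destination ",").getD []
  let rcpt_arr := (PySem.List.pyRange 0 to_.length 1).foldl
    (fun acc i => acc ++ [PySem.List.pyGetD to_ i ""]) rcpt_arr
  let rcpt_arr := (PySem.List.pyRange 0 cc.length 1).foldl
    (fun acc i => acc ++ [PySem.List.pyGetD cc i ""]) rcpt_arr
  let rcpt_arr := (PySem.List.pyRange 0 bcc.length 1).foldl
    (fun acc i => acc ++ [PySem.List.pyGetD bcc i ""]) rcpt_arr
  -- for i in range(len(rcpt_arr)): rcpt_arr[i] = rcpt_arr[i].strip()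
  rcpt_arr.map PySem.Str.strip

-- ===== PORT B =====
-- one string of B's outer loop: char-by-char scan over s with state (rcpt, cur);
-- on ',' flush ''.join(cur).strip(), else extend cur; flush the last token after the loop
def pvScanOne (s : String) (rcpt : List String) : List String :=
  let st := s.toList.foldl
    (fun (p : List String × List Char) ch =>
      if ch = ',' then (p.1 ++ [PySem.Str.strip (String.ofList p.2)], [])
      else (p.1, p.2 ++ [ch]))
    (rcpt, [])
  st.1 ++ [PySem.Str.strip (String.ofList st.2)]

def Get_RcptArr_alt (Destinationemail : String) (cc_Destination : String) (bcc_Destination : String) : List String :=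
  pvScanOne bcc_Destination (pvScanOne cc_Destination (pvScanOne Destinationemail []))

-- ===== PRECONDITION & SPEC =====
def Spec_Get_RcptArr (Destinationemail : String) (cc_Destination : String) (bcc_Destination : String) (out : List String) : Prop := out = Get_RcptArr_alt Destinationemail cc_Destination bcc_Destination
instance (Destinationemail : String) (cc_Destination : String) (bcc_Destination : String) (out : List String) : Decidable (Spec_Get_RcptArr Destinationemail cc_Destination bcc_Destination out) := by unfold Spec_Get_RcptArr; infer_instance

-- ===== CLAIM (what is proved, stated in full; the proofs are below) =====
def Claim_equal_Get_RcptArr : Prop := ∀ (Destinationemail : String) (cc_Destination : String) (bcc_Destination : String), Dom_Get_RcptArr Destinationemail cc_Destination bcc_Destination → Spec_Get_RcptArr Destinationemail cc_Destination bcc_Destination (Get_RcptArr Destinationemail cc_Destination bcc_Destination)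

-- ===== LEMMAS AND PROOFS =====

theorem modifyHead_fun_id {α : Type} (l : List α) : l.modifyHead (fun x => x) = l := by
  cases l <;> simp

/-- simple structural characterisation of splitting on a single comma -/
def splitC : List Char → List (List Char)
  | [] => [[]]
  | c :: t => if c = ',' then [] :: splitC t else (splitC t).modifyHead (c :: ·)

theorem splitC_ne_nil (l : List Char) : splitC l ≠ [] := by
  cases l with
  | nil => simp [splitC]
  | cons c t =>
    simp only [splitC]
    split <;> simp [List.modifyHead_eq_nil_iff, splitC_ne_nil t]

theorem go_eq_splitC (fuel : Nat) (l cur : List Char) (acc : List (List Char))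
    (h : l.length ≤ fuel) :
    PySem.Chars.splitOn.go [','] fuel l cur acc
      = acc.reverse ++ (splitC l).modifyHead (cur.reverse ++ ·) := by
  induction fuel generalizing l cur acc with
  | zero =>
    have : l = [] := List.length_eq_zero_iff.mp (Nat.le_zero.mp h)
    subst this
    simp [PySem.Chars.splitOn.go, splitC]
  | succ fuel ih =>
    cases l with
    | nil => simp [PySem.Chars.splitOn.go, splitC]
    | cons c rest =>
      have hlen : rest.length ≤ fuel := by simp at h; omega
      rw [PySem.Chars.splitOn.go]
      by_cases hc : c = ','
      · subst hc
        rw [if_pos (by simp [List.isPrefixOf])]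
        have hd : List.drop [','].length (',' :: rest) = rest := by simp
        rw [hd, ih rest [] _ hlen]
        simp [splitC, modifyHead_fun_id]
      · rw [if_neg (by rw [List.isPrefixOf]; simp; exact fun h => hc h.symm)]
        rw [ih rest (c :: cur) acc hlen]
        simp only [splitC, if_neg hc, List.modifyHead_modifyHead]
        congr 2
        funext x
        simp

theorem splitOn_eq_splitC (l : List Char) :
    PySem.Chars.splitOn l [','] = splitC l := by
  unfold PySem.Chars.splitOn
  rw [go_eq_splitC _ _ _ _ (by omega)]
  simp [modifyHead_fun_id]

theorem str_split_comma (s : String) :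
    (PySem.Str.split? s ",").getD [] = (splitC s.toList).map String.ofList := by
  have h := PySem.Str.split?_map s ","
  rw [PySem.Chars.split?, if_neg (by decide)] at h
  rcases hs : PySem.Str.split? s "," with _ | l <;> rw [hs] at h
  · simp at h
  · simp only [Option.map_some, Option.some.injEq] at h
    have hl : l.map String.toList = splitC s.toList := by
      rw [h, show (",".toList) = [','] from rfl, splitOn_eq_splitC]
    have : l = (splitC s.toList).map String.ofList := by
      rw [← hl]
      simp [List.map_map, Function.comp_def]
    simpa using this

theorem foldl_push {α : Type} (t : List α) (init : List α) :
    t.foldl (fun acc x => acc ++ [x]) init = init ++ t := by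
  induction t generalizing init with
  | nil => simp
  | cons x t ih => simp [ih]

theorem append_fold (xs : List String) (init : List String) :
    (PySem.List.pyRange 0 xs.length 1).foldl
      (fun acc i => acc ++ [PySem.List.pyGetD xs i ""]) init = init ++ xs := by
  have h := PySem.List.foldl_pyRange_pyGetD xs ""
    (fun (acc : List String) (x : String) => acc ++ [x]) init (a := 0) (by omega)
  have e : PySem.List.pyRange 0 (xs.length) 1 = PySem.List.pyRange 0 (PySem.List.len xs) := by
    simp [PySem.List.len]
  rw [e, h, Int.toNat_zero, List.drop_zero, foldl_push]

/-- the B-side scan loop, with the running token generalised -/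
theorem scan_go (l : List Char) (rcpt : List String) (cur : List Char) :
    (let st := l.foldl
        (fun (p : List String × List Char) ch =>
          if ch = ',' then (p.1 ++ [PySem.Str.strip (String.ofList p.2)], [])
          else (p.1, p.2 ++ [ch]))
        (rcpt, cur)
     st.1 ++ [PySem.Str.strip (String.ofList st.2)])
      = rcpt ++ ((splitC l).modifyHead (cur ++ ·)).map
          (fun t => PySem.Str.strip (String.ofList t)) := by
  induction l generalizing rcpt cur with
  | nil => simp [splitC]
  | cons c t ih =>
    by_cases hc : c = ','
    · subst hc
      simp only [List.foldl_cons, splitC]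
      rw [ih]
      simp [modifyHead_fun_id]
    · simp only [List.foldl_cons, if_neg hc, splitC]
      rw [ih, List.modifyHead_modifyHead]
      congr 3
      funext x
      simp

theorem pvScanOne_eq (s : String) (rcpt : List String) :
    pvScanOne s rcpt
      = rcpt ++ (splitC s.toList).map (fun t => PySem.Str.strip (String.ofList t)) := by
  unfold pvScanOne
  rw [scan_go]
  rw [show (splitC s.toList).modifyHead (([] : List Char) ++ ·) = splitC s.toList by
    simpa using modifyHead_fun_id (splitC s.toList)]

-- ===== VERDICT (by name: the statement is the Claim_ definition above) =====
theorem Get_RcptArr_spec : Claim_equal_Get_RcptArr := by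
  intro d cc bcc _
  unfold Spec_Get_RcptArr Get_RcptArr Get_RcptArr_alt
  simp only [append_fold, str_split_comma, List.nil_append, pvScanOne_eq]
  simp [List.map_map, Function.comp_def]
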